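-- pv_equiv track=rewrite | github.com/fractalego/tree_parser | tree_parser/utils.py | divide_lines_into_sentences
-- ===== SOURCE A (Python) =====
-- def divide_lines_into_sentences(lines):
--     lines = [item for item in lines if item and item[0] != '#']
--     sentences = []
--     sentence = []
--     for line in lines:
--         line = line[:-1]
--         if not line:
--             sentences.append(sentence)
--             sentence = []
--             continue
--         sentence.append(line)
--     return sentences
-- ===== SOURCE B (Python) =====
-- def divide_lines_into_sentences(lines):
--     stripped = [line[:-1] for line in lines if line and line[0] != '#']
--     sentences = []
--     start = 0
--     while True:
--         try:
--             i = stripped.index('', start)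
--         except ValueError:
--             return sentences
--         sentences.append(stripped[start:i])
--         start = i + 1
-- ===== Notes on version B (the rewrite author's own statement) =====
-- stated objective: alternative
-- what changed: A accumulates the current sentence line by line in a running pair of accumulators; B first builds the stripped line list, then repeatedly finds the next blank-line separator with list.index and emits the slice before it, continuing on the slice after it (the trailing unterminated segment is naturally never emitted).
import Mathlib
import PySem

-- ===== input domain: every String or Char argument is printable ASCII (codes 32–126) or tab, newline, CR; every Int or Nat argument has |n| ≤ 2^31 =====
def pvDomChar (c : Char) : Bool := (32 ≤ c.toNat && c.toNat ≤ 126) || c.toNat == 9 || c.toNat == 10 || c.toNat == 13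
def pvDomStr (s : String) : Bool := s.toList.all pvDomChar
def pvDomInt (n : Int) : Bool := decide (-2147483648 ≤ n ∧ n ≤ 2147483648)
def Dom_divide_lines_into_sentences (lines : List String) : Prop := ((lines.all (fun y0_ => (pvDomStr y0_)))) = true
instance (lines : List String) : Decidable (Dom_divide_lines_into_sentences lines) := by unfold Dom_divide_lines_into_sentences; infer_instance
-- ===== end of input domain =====

-- B replaces A's element-by-element accumulator loop by a find-next-separator-and-slice
-- scan over the pre-stripped list (objective: alternative decomposition).

-- shared helpers: both Pythons do the same `if item and item[0] != '#'` filter and `line[:-1]` strip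
def pvKeep (item : String) : Bool := (!(item == "")) && (PySem.Str.pyGet? item 0 != some '#')
def pvStrip (line : String) : String := PySem.Str.slice line none (some (-1))

-- ===== PORT A =====
def divide_lines_into_sentences (lines : List String) : List (List String) :=
  let lines := lines.filter pvKeep
  (lines.foldl
    (fun (st : List (List String) × List String) (line : String) =>
      let line := pvStrip line
      if line = "" then (st.1 ++ [st.2], [])
      else (st.1, st.2 ++ [line]))
    ([], [])).1

-- ===== PORT B =====
-- Python's xs.index(v, start) for 0 ≤ start: the first index ≥ start holding v (none = ValueError)
def pvIndexFrom (xs : List String) (v : String) (start : Nat) : Option Nat :=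
  (PySem.List.index? (xs.drop start) v).map (· + start)

-- the while-loop of Source B: find the next '' at or after start, emit xs[start:i], continue at i+1
def pvSplitFrom (xs : List String) (start : Nat) : List (List String) :=
  match h : pvIndexFrom xs "" start with
  | none => []
  | some i =>
      PySem.List.slice xs (some (start : Int)) (some (i : Int)) :: pvSplitFrom xs (i + 1)
termination_by xs.length - start
decreasing_by
  obtain ⟨j, hj, rfl⟩ := Option.map_eq_some_iff.mp h
  have hmem : "" ∈ xs.drop start := (PySem.List.index?_isSome_iff _ _).mp (by rw [hj]; rfl)
  have hlen : 0 < (xs.drop start).length := List.length_pos_iff.mpr (by rintro hnil; rw [hnil] at hmem; simp at hmem)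
  simp only [List.length_drop] at hlen
  omega

def divide_lines_into_sentences_alt (lines : List String) : List (List String) :=
  let stripped := (lines.filter pvKeep).map pvStrip
  pvSplitFrom stripped 0

-- ===== PRECONDITION & SPEC =====
def Spec_divide_lines_into_sentences (lines : List String) (out : List (List String)) : Prop := out = divide_lines_into_sentences_alt lines
instance (lines : List String) (out : List (List String)) : Decidable (Spec_divide_lines_into_sentences lines out) := by unfold Spec_divide_lines_into_sentences; infer_instance

-- ===== CLAIM (what is proved, stated in full; the proofs are below) =====
def Claim_equal_divide_lines_into_sentences : Prop := ∀ (lines : List String), Dom_divide_lines_into_sentences lines → Spec_divide_lines_into_sentences lines (divide_lines_into_sentences lines)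

-- ===== LEMMAS AND PROOFS =====

-- proof-side view of B's scan: recursion on the suffix of the list not yet consumed
def pvSplitRec (rest : List String) : List (List String) :=
  match h : PySem.List.index? rest "" with
  | none => []
  | some i =>
      PySem.List.slice rest none (some (i : Int)) :: pvSplitRec (rest.drop (i + 1))
termination_by rest.length
decreasing_by
  have hmem : "" ∈ rest := (PySem.List.index?_isSome_iff rest "").mp (by rw [h]; rfl)
  have hlen : 0 < rest.length := List.length_pos_iff.mpr (by rintro rfl; simp at hmem)
  simp only [List.length_drop]
  omega

-- equation lemmas for the two well-founded recursions
theorem pvSplitFrom_none (xs : List String) (start : Nat) (h : pvIndexFrom xs "" start = none) :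
    pvSplitFrom xs start = [] := by
  rw [pvSplitFrom.eq_def, h]

theorem pvSplitFrom_some (xs : List String) (start i : Nat) (h : pvIndexFrom xs "" start = some i) :
    pvSplitFrom xs start = PySem.List.slice xs (some (start : Int)) (some (i : Int)) :: pvSplitFrom xs (i + 1) := by
  rw [pvSplitFrom.eq_def, h]

theorem pvSplitRec_none (rest : List String) (h : PySem.List.index? rest "" = none) :
    pvSplitRec rest = [] := by
  rw [pvSplitRec.eq_def, h]

theorem pvSplitRec_some (rest : List String) (i : Nat) (h : PySem.List.index? rest "" = some i) :
    pvSplitRec rest = PySem.List.slice rest none (some (i : Int)) :: pvSplitRec (rest.drop (i + 1)) := by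
  rw [pvSplitRec.eq_def, h]

-- B's index-advancing scan computes the suffix recursion
theorem pvSplitFrom_eq_rec (xs : List String) (start : Nat) :
    pvSplitFrom xs start = pvSplitRec (xs.drop start) := by
  induction start using pvSplitFrom.induct (xs := xs) with
  | case1 start h =>
      unfold pvIndexFrom at h
      rw [pvSplitFrom_none _ _ (by unfold pvIndexFrom; rw [Option.map_eq_none_iff.mp h]; rfl),
          pvSplitRec_none _ (Option.map_eq_none_iff.mp h)]
  | case2 start i h ih =>
      obtain ⟨j, hj, hij⟩ := Option.map_eq_some_iff.mp h
      subst hij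
      rw [pvSplitFrom_some _ _ _ h, pvSplitRec_some _ _ hj, ih]
      congr 1
      · rw [PySem.List.slice_natCast, PySem.List.slice_to_natCast,
            show j + start - start = j by omega]
      · congr 1
        rw [List.drop_drop]
        congr 1
        omega

-- pvSplitRec generalized by the partial sentence carried at the front
def pvSplitG (cur : List String) (rest : List String) : List (List String) :=
  match PySem.List.index? rest "" with
  | none => []
  | some i => (cur ++ rest.take i) :: pvSplitRec (rest.drop (i + 1))

theorem pvSplitRec_eq_G (rest : List String) : pvSplitRec rest = pvSplitG [] rest := by
  rw [pvSplitRec.eq_def]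
  unfold pvSplitG
  cases h : PySem.List.index? rest "" with
  | none => rfl
  | some i => simp [PySem.List.slice_to_natCast]

theorem pvSplitG_blank (cur : List String) (ys : List String) :
    pvSplitG cur ("" :: ys) = cur :: pvSplitRec ys := by
  unfold pvSplitG
  rw [PySem.List.index?_cons_self]
  simp

theorem pvSplitG_cons (cur : List String) (s : String) (ys : List String) (hs : s ≠ "") :
    pvSplitG cur (s :: ys) = pvSplitG (cur ++ [s]) ys := by
  unfold pvSplitG
  rw [PySem.List.index?_cons_of_ne ys hs]
  cases h : PySem.List.index? ys "" with
  | none => rfl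
  | some i => simp [List.take_succ_cons, List.drop_succ_cons]

-- the loop invariant relating A's fold to B's splitter
theorem pvLoop (xs : List String) : ∀ (sents : List (List String)) (cur : List String),
    (xs.foldl
      (fun (st : List (List String) × List String) (line : String) =>
        let line := pvStrip line
        if line = "" then (st.1 ++ [st.2], [])
        else (st.1, st.2 ++ [line]))
      (sents, cur)).1 = sents ++ pvSplitG cur (xs.map pvStrip) := by
  induction xs with
  | nil => intro sents cur; simp [pvSplitG]
  | cons x xs ih =>
      intro sents cur
      by_cases hx : pvStrip x = ""
      · simp only [List.foldl_cons, List.map_cons, hx]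
        rw [ih, pvSplitG_blank, pvSplitRec_eq_G]
        simp
      · simp only [List.foldl_cons, List.map_cons, if_neg hx]
        rw [ih, pvSplitG_cons _ _ _ hx]

-- ===== VERDICT (by name: the statement is the Claim_ definition above) =====
theorem divide_lines_into_sentences_spec : Claim_equal_divide_lines_into_sentences := by
  intro lines _
  unfold Spec_divide_lines_into_sentences divide_lines_into_sentences divide_lines_into_sentences_alt
  rw [pvLoop, pvSplitFrom_eq_rec, List.drop_zero, pvSplitRec_eq_G]
  simp
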